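-- pv_equiv track=rewrite | github.com/Shaan08/Scalable-Machine-Learning--Yelp | yelp.py | mod_labels
-- ===== SOURCE A (Python) =====
-- def mod_labels(labels):
--     #labels in the dataset.
--     good_for_lunch = []
--     good_for_dinner = []
--     takes_reservations = []
--     outdoor_seating = []
--     restaurant_is_expensive = []
--     has_alcohol = []
--     has_table_service = []
--     ambience_is_classy = []
--     good_for_kids = []
--
--     for i in labels:
--         vals = i.split() #split the string labels.
--
--         if '0' in vals:
--             good_for_lunch.append(1)
--         else:
--             good_for_lunch.append(0)
--
--         if '1' in vals:
--             good_for_dinner.append(1)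
--         else:
--             good_for_dinner.append(0)
--
--         if '2' in vals:
--             takes_reservations.append(1)
--         else:
--             takes_reservations.append(0)
--
--         if '3' in vals:
--             outdoor_seating.append(1)
--         else:
--             outdoor_seating.append(0)
--
--         if '4' in vals:
--             restaurant_is_expensive.append(1)
--         else:
--             restaurant_is_expensive.append(0)
--
--         if '5' in vals:
--             has_alcohol.append(1)
--         else:
--             has_alcohol.append(0)
--
--         if '6' in vals:
--             has_table_service.append(1)
--         else:
--             has_table_service.append(0)
--
--         if '7' in vals:
--             ambience_is_classy.append(1)
--         else:
--             ambience_is_classy.append(0)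
--
--         if '8' in vals:
--             good_for_kids.append(1)
--         else:
--             good_for_kids.append(0)
--
--         if 'nan' in vals:
--             pass
--         else:
--             pass
--
--     return good_for_lunch,good_for_dinner,takes_reservations,outdoor_seating ,restaurant_is_expensive ,has_alcohol,has_table_service ,ambience_is_classy ,good_for_kids
-- ===== SOURCE B (Python) =====
-- def mod_labels(labels):
--     # Transposed: build each category column in its own pass over labels.
--     def column(c):
--         d = str(c)
--         return [1 if d in lab.split() else 0 for lab in labels]
--     return tuple(column(c) for c in range(9))
-- ===== Notes on version B (the rewrite author's own statement) =====
-- stated objective: simpler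
-- what changed: Transposed the iteration: instead of one pass over labels filling nine lists via nine if/else blocks, B loops over the nine category digits and builds each whole column with a comprehension over labels.
import Mathlib
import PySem

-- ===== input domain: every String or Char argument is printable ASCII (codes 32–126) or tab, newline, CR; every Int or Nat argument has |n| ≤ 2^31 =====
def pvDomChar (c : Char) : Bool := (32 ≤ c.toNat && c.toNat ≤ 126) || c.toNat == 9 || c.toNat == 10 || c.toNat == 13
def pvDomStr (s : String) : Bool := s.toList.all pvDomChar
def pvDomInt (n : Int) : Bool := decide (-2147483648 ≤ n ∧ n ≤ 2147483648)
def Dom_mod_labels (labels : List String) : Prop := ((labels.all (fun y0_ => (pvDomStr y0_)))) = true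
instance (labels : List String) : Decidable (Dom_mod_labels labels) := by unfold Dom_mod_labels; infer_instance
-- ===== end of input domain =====

-- B changes only the decomposition (nine per-digit passes instead of one multi-column pass); equivalent, not faster.

-- ===== PORT A =====
-- state of A's loop: the nine accumulator lists, appended to per label in order
def mod_labels_loop (labels : List String)
    (s : List Int × List Int × List Int × List Int × List Int × List Int × List Int × List Int × List Int) :
    List Int × List Int × List Int × List Int × List Int × List Int × List Int × List Int × List Int :=
  match labels with
  | [] => s
  | i :: rest =>
    let vals := PySem.Str.split₀ i
    mod_labels_loop rest
      (s.1 ++ [if "0" ∈ vals then (1 : Int) else 0],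
       s.2.1 ++ [if "1" ∈ vals then (1 : Int) else 0],
       s.2.2.1 ++ [if "2" ∈ vals then (1 : Int) else 0],
       s.2.2.2.1 ++ [if "3" ∈ vals then (1 : Int) else 0],
       s.2.2.2.2.1 ++ [if "4" ∈ vals then (1 : Int) else 0],
       s.2.2.2.2.2.1 ++ [if "5" ∈ vals then (1 : Int) else 0],
       s.2.2.2.2.2.2.1 ++ [if "6" ∈ vals then (1 : Int) else 0],
       s.2.2.2.2.2.2.2.1 ++ [if "7" ∈ vals then (1 : Int) else 0],
       s.2.2.2.2.2.2.2.2 ++ [if "8" ∈ vals then (1 : Int) else 0])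

def mod_labels (labels : List String) : List Int × List Int × List Int × List Int × List Int × List Int × List Int × List Int × List Int :=
  mod_labels_loop labels ([], [], [], [], [], [], [], [], [])

-- ===== PORT B =====
-- column c = [1 if str(c) in lab.split() else 0 for lab in labels]
def mod_labels_column (labels : List String) (c : Int) : List Int :=
  labels.map (fun lab => if PySem.Int.toStr c ∈ PySem.Str.split₀ lab then (1 : Int) else 0)

def mod_labels_alt (labels : List String) : List Int × List Int × List Int × List Int × List Int × List Int × List Int × List Int × List Int :=
  (mod_labels_column labels 0, mod_labels_column labels 1, mod_labels_column labels 2,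
   mod_labels_column labels 3, mod_labels_column labels 4, mod_labels_column labels 5,
   mod_labels_column labels 6, mod_labels_column labels 7, mod_labels_column labels 8)

-- ===== PRECONDITION & SPEC =====
def Spec_mod_labels (labels : List String) (out : List Int × List Int × List Int × List Int × List Int × List Int × List Int × List Int × List Int) : Prop := out = mod_labels_alt labels
instance (labels : List String) (out : List Int × List Int × List Int × List Int × List Int × List Int × List Int × List Int × List Int) : Decidable (Spec_mod_labels labels out) := by unfold Spec_mod_labels; exact (@instDecidableEqProd _ _ inferInstance (@instDecidableEqProd _ _ inferInstance (@instDecidableEqProd _ _ inferInstance (@instDecidableEqProd _ _ inferInstance (@instDecidableEqProd _ _ inferInstance (@instDecidableEqProd _ _ inferInstance (@instDecidableEqProd _ _ inferInstance inferInstance))))))) out (mod_labels_alt labels)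

-- ===== CLAIM (what is proved, stated in full; the proofs are below) =====
def Claim_equal_mod_labels : Prop := ∀ (labels : List String), Dom_mod_labels labels → Spec_mod_labels labels (mod_labels labels)

-- ===== LEMMAS AND PROOFS =====
theorem mod_labels_loop_eq (labels : List String)
    (a0 a1 a2 a3 a4 a5 a6 a7 a8 : List Int) :
    mod_labels_loop labels (a0, a1, a2, a3, a4, a5, a6, a7, a8) =
      (a0 ++ mod_labels_column labels 0, a1 ++ mod_labels_column labels 1,
       a2 ++ mod_labels_column labels 2, a3 ++ mod_labels_column labels 3,
       a4 ++ mod_labels_column labels 4, a5 ++ mod_labels_column labels 5,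
       a6 ++ mod_labels_column labels 6, a7 ++ mod_labels_column labels 7,
       a8 ++ mod_labels_column labels 8) := by
  induction labels generalizing a0 a1 a2 a3 a4 a5 a6 a7 a8 with
  | nil => simp [mod_labels_loop, mod_labels_column]
  | cons i rest ih =>
    simp only [mod_labels_loop, mod_labels_column, List.map_cons, ih, List.append_assoc,
      List.singleton_append, mod_labels_column]
    have h0 : PySem.Int.toStr 0 = "0" := by decide
    have h1 : PySem.Int.toStr 1 = "1" := by decide
    have h2 : PySem.Int.toStr 2 = "2" := by decide
    have h3 : PySem.Int.toStr 3 = "3" := by decide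
    have h4 : PySem.Int.toStr 4 = "4" := by decide
    have h5 : PySem.Int.toStr 5 = "5" := by decide
    have h6 : PySem.Int.toStr 6 = "6" := by decide
    have h7 : PySem.Int.toStr 7 = "7" := by decide
    have h8 : PySem.Int.toStr 8 = "8" := by decide
    simp [h0, h1, h2, h3, h4, h5, h6, h7, h8]

-- ===== VERDICT (by name: the statement is the Claim_ definition above) =====
theorem mod_labels_spec : Claim_equal_mod_labels := by
  intro labels _
  show mod_labels labels = mod_labels_alt labels
  simp [mod_labels, mod_labels_alt, mod_labels_loop_eq]
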